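-- pv_equiv track=rewrite | github.com/Roshan1115/PythonNTEL | OnlineExam/q5.py | sum3cubes
-- ===== SOURCE A (Python) =====
-- def sum3cubes(n):
--     for i in range(1,n-1):
--         for j in range(1,n-1):
--             for k in range(1,n-1):
--                 if i**3 + j**3 + k**3 == n:
--                     return True
--     else:
--         return False
-- ===== SOURCE B (Python) =====
-- def sum3cubes(n):
--     cubes = []
--     c = 1
--     while c * c * c <= n - 2:
--         cubes.append(c * c * c)
--         c += 1
--     targets = set(cubes)
--     for a in cubes:
--         for b in cubes:
--             if n - a - b in targets:
--                 return True
--     return False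
-- ===== Notes on version B (the rewrite author's own statement) =====
-- stated objective: faster
-- what changed: Replaces the triple nested scan up to n with two loops over the precomputed list of cubes <= n-2 plus a set lookup for the third cube.
import Mathlib
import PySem

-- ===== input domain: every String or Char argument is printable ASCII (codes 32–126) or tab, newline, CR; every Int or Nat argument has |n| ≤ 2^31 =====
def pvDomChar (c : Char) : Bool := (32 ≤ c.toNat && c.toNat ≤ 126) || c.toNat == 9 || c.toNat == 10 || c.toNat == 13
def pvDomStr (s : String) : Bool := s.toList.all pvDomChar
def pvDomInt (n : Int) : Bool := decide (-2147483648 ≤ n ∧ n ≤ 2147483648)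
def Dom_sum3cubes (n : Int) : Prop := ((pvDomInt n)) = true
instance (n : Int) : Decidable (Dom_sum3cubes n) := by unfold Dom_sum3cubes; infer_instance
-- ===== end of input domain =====

-- B replaces A's triple scan up to n by two loops over precomputed cubes ≤ n-2 with a set lookup for the third cube (faster).


-- ===== PORT A =====
def sum3cubes (n : Int) : Bool :=
  (PySem.List.pyRange 1 (n - 1) 1).any fun i =>
    (PySem.List.pyRange 1 (n - 1) 1).any fun j =>
      (PySem.List.pyRange 1 (n - 1) 1).any fun k =>
        i ^ 3 + j ^ 3 + k ^ 3 == n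

-- ===== PORT B =====
-- while loop of Source B; the fuel only makes the recursion structural (c ≤ c³ ≤ n-2, so n.toNat steps always suffice)
def cubesAux (n c : Int) : Nat → List Int
  | 0 => []
  | f + 1 => if c * c * c ≤ n - 2 then (c * c * c) :: cubesAux n (c + 1) f else []

def sum3cubes_alt (n : Int) : Bool :=
  let cubes := cubesAux n 1 n.toNat
  let targets : PySem.Set Int := PySem.Set.ofList cubes
  cubes.any fun a => cubes.any fun b => PySem.Set.contains targets (n - a - b)

-- ===== PRECONDITION & SPEC =====
def Spec_sum3cubes (n : Int) (out : Bool) : Prop := out = sum3cubes_alt n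
instance (n : Int) (out : Bool) : Decidable (Spec_sum3cubes n out) := by unfold Spec_sum3cubes; infer_instance

-- ===== CLAIM (what is proved, stated in full; the proofs are below) =====
def Claim_equal_sum3cubes : Prop := ∀ (n : Int), Dom_sum3cubes n → Spec_sum3cubes n (sum3cubes n)

-- ===== LEMMAS AND PROOFS =====

-- both programs decide this proposition
def HasCubes (n : Int) : Prop :=
  ∃ i j k : Int, 1 ≤ i ∧ 1 ≤ j ∧ 1 ≤ k ∧ i ^ 3 + j ^ 3 + k ^ 3 = n

lemma self_le_cube {d : Int} (h : 1 ≤ d) : d ≤ d * d * d := by nlinarith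

lemma mem_cubesAux (n : Int) :
    ∀ (fuel : Nat) (c : Int), 1 ≤ c → n - 2 < c + fuel →
      ∀ x, x ∈ cubesAux n c fuel ↔ ∃ d : Int, c ≤ d ∧ d * d * d ≤ n - 2 ∧ x = d * d * d := by
  intro fuel
  induction fuel with
  | zero =>
      intro c hc hf x
      simp only [cubesAux, List.not_mem_nil, false_iff]
      rintro ⟨d, hd1, hd2, rfl⟩
      have : d ≤ d * d * d := self_le_cube (by omega)
      omega
  | succ f ih =>
      intro c hc hf x
      simp only [cubesAux]
      split_ifs with h
      · rw [List.mem_cons, ih (c + 1) (by omega) (by push_cast at hf ⊢; omega)]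
        constructor
        · rintro (rfl | ⟨d, hd1, hd2, rfl⟩)
          · exact ⟨c, le_refl c, h, rfl⟩
          · exact ⟨d, by omega, hd2, rfl⟩
        · rintro ⟨d, hd1, hd2, rfl⟩
          rcases eq_or_lt_of_le hd1 with rfl | hlt
          · exact Or.inl rfl
          · exact Or.inr ⟨d, by omega, hd2, rfl⟩
      · simp only [List.not_mem_nil, false_iff]
        rintro ⟨d, hd1, hd2, rfl⟩
        have h1 : c * c ≤ d * d := by nlinarith
        have : c * c * c ≤ d * d * d := by nlinarith
        omega

lemma sum3cubes_iff (n : Int) : sum3cubes n = true ↔ HasCubes n := by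
  simp only [sum3cubes, List.any_eq_true, PySem.List.mem_pyRange_one, beq_iff_eq, HasCubes]
  constructor
  · rintro ⟨i, ⟨hi, _⟩, j, ⟨hj, _⟩, k, ⟨hk, _⟩, hsum⟩
    exact ⟨i, j, k, hi, hj, hk, hsum⟩
  · rintro ⟨i, j, k, hi, hj, hk, hsum⟩
    have hii : i ≤ i * i * i := self_le_cube hi
    have hjj : j ≤ j * j * j := self_le_cube hj
    have hkk : k ≤ k * k * k := self_le_cube hk
    have e : i * i * i + j * j * j + k * k * k = n := by ring_nf; ring_nf at hsum; linarith
    refine ⟨i, ⟨hi, by nlinarith⟩, j, ⟨hj, by nlinarith⟩, k, ⟨hk, by nlinarith⟩, hsum⟩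

lemma sum3cubes_alt_iff (n : Int) : sum3cubes_alt n = true ↔ HasCubes n := by
  have hmem := mem_cubesAux n n.toNat 1 (le_refl 1) (by omega)
  simp only [sum3cubes_alt, List.any_eq_true, PySem.Set.contains, List.contains_iff_mem,
    PySem.Set.mem_ofList, HasCubes]
  constructor
  · rintro ⟨a, ha, b, hb, hc⟩
    rcases (hmem a).mp ha with ⟨i, hi1, hi2, rfl⟩
    rcases (hmem b).mp hb with ⟨j, hj1, hj2, rfl⟩
    rcases (hmem _).mp hc with ⟨k, hk1, hk2, hk3⟩
    exact ⟨i, j, k, hi1, hj1, hk1, by ring_nf; ring_nf at hk3; linarith⟩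
  · rintro ⟨i, j, k, hi, hj, hk, hsum⟩
    have hii : i ≤ i * i * i := self_le_cube hi
    have hjj : j ≤ j * j * j := self_le_cube hj
    have hkk : k ≤ k * k * k := self_le_cube hk
    have e : i * i * i + j * j * j + k * k * k = n := by ring_nf; ring_nf at hsum; linarith
    exact ⟨i * i * i, (hmem _).mpr ⟨i, hi, by nlinarith, rfl⟩,
           j * j * j, (hmem _).mpr ⟨j, hj, by nlinarith, rfl⟩,
           (hmem _).mpr ⟨k, hk, by nlinarith, by linarith⟩⟩

-- ===== VERDICT (by name: the statement is the Claim_ definition above) =====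
theorem sum3cubes_spec : Claim_equal_sum3cubes := by
  intro n _
  unfold Spec_sum3cubes
  have hA := sum3cubes_iff n
  have hB := sum3cubes_alt_iff n
  cases h1 : sum3cubes n <;> cases h2 : sum3cubes_alt n <;> simp_all
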